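-- pv_equiv track=rewrite | github.com/kimyenac/Algorithm | 프로그래머스/unrated/181881. 조건에 맞게 수열 변환하기 2/조건에 맞게 수열 변환하기 2.py | solution
-- ===== SOURCE A (Python) =====
-- def solution(arr):
--     idx = 0
--     answer = []
--     while True:
--         answer = arr.copy()
--         for i in range(len(arr)):
--             val = arr[i]
--             if val >= 50 and val % 2 == 0:
--                 arr[i] //= 2
--             elif val < 50 and val % 2 != 0:
--                 arr[i] *= 2
--                 arr[i] += 1
--         if (arr == answer):
--             return idx
--         idx += 1
-- ===== SOURCE B (Python) =====
-- def solution(arr):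
--     # Per-element convergence: each element stabilizes independently; the number
--     # of changing whole-array passes A performs equals the max per-element step count.
--     best = 0
--     for i, v in enumerate(arr):
--         steps = 0
--         while True:
--             if v >= 50 and v % 2 == 0:
--                 nxt = v // 2
--             elif v < 50 and v % 2 != 0:
--                 nxt = 2 * v + 1
--             else:
--                 nxt = v
--             if nxt == v:
--                 break
--             v = nxt
--             steps += 1
--         arr[i] = v
--         if steps > best:
--             best = steps
--     return best
-- ===== Notes on version B (the rewrite author's own statement) =====
-- stated objective: alternative
-- what changed: Replaces the repeated whole-array passes (copy + full scan until a fixed point) by an independent per-element convergence loop, returning the maximum per-element step count.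
import Mathlib
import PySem

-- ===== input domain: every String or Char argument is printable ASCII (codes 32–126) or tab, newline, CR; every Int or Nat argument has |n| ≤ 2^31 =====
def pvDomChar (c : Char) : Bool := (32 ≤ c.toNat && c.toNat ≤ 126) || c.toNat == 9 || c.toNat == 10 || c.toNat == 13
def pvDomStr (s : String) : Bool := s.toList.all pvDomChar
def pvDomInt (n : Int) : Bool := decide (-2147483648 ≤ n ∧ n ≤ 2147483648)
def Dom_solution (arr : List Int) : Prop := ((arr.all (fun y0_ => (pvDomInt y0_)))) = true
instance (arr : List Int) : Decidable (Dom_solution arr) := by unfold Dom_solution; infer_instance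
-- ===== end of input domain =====

-- B replaces A's repeated whole-array passes with an independent per-element
-- convergence loop and a running maximum (alternative decomposition, same cost class).
-- Both Pythons mutate arr in place to its stabilized state; the theorems are about
-- the return value only (the final array contents coincide as well, but are not modeled).

-- ===== PORT A =====
-- one update of a single element (the two branches of A's inner for-body, shared by both ports)
def pvStep (v : Int) : Int :=
  if 50 ≤ v ∧ PySem.Int.mod v 2 = 0 then PySem.Int.floordiv v 2
  else if v < 50 ∧ PySem.Int.mod v 2 ≠ 0 then 2 * v + 1
  else v

-- termination measure for one element (proof device only; never changes a computed value)
def pvMeas (v : Int) : Nat :=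
  if 50 ≤ v ∧ PySem.Int.mod v 2 = 0 then v.toNat + 64
  else if 0 ≤ v ∧ v < 50 ∧ PySem.Int.mod v 2 ≠ 0 then (50 - v).toNat
  else 0

def pvMeasL (arr : List Int) : Nat := (arr.map pvMeas).sum

-- A's `while True` loop: one full pass (arr.map pvStep), stop when unchanged.
-- The inner dite is a totality guard only: on inputs satisfying Pre_solution the
-- measure always decreases (proved below), so the `else idx` branch is never taken.
def pvLoopA (arr : List Int) (idx : Int) : Int :=
  if arr.map pvStep = arr then idx
  else if h : pvMeasL (arr.map pvStep) < pvMeasL arr then pvLoopA (arr.map pvStep) (idx + 1)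
  else idx
termination_by pvMeasL arr

def solution (arr : List Int) : Int := pvLoopA arr 0

-- ===== PORT B =====
-- B's inner `while True` loop for one element: compute the next value, stop when it
-- no longer changes, else count one step. The dite is the same totality guard;
-- under Pre_solution it always succeeds.
def pvElemSteps (v : Int) : Int :=
  if pvStep v = v then 0
  else if h : pvMeas (pvStep v) < pvMeas v then 1 + pvElemSteps (pvStep v)
  else 0
termination_by pvMeas v

def solution_alt (arr : List Int) : Int :=
  arr.foldl (fun best v =>
    let steps := pvElemSteps v
    if best < steps then steps else best) 0

-- ===== PRECONDITION & SPEC =====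
-- Pre_ excludes arrays containing an odd element ≤ -3: on those A's `while True`
-- loop never terminates (2*v+1 stays odd and strictly decreases), so A returns
-- (and B returns) on exactly the inputs admitted by Pre_.
def Pre_solution (arr : List Int) : Prop := ∀ v ∈ arr, 0 ≤ v ∨ v % 2 = 0 ∨ v = -1
instance (arr : List Int) : Decidable (Pre_solution arr) := by unfold Pre_solution; infer_instance
def pvWitness_solution : List Int := [100, 3, 0, -1, -4]

def Spec_solution (arr : List Int) (out : Int) : Prop := out = solution_alt arr
instance (arr : List Int) (out : Int) : Decidable (Spec_solution arr out) := by unfold Spec_solution; infer_instance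

-- ===== CLAIM (what is proved, stated in full; the proofs are below) =====
def Claim_equal_solution : Prop := ∀ (arr : List Int), Dom_solution arr → Pre_solution arr → Spec_solution arr (solution arr)

-- ===== LEMMAS AND PROOFS =====

-- convergent elements: nonnegative, even, or the fixed point -1
def pvGood (v : Int) : Prop := 0 ≤ v ∨ v % 2 = 0 ∨ v = -1

theorem pvGood_step {v : Int} (hg : pvGood v) : pvGood (pvStep v) := by
  unfold pvGood at hg ⊢
  unfold pvStep
  have hm : PySem.Int.mod v 2 = v % 2 := PySem.Int.mod_eq_emod_of_pos (by norm_num)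
  have hd : PySem.Int.floordiv v 2 = v / 2 := PySem.Int.floordiv_eq_ediv_of_pos (by norm_num)
  rw [hm, hd]
  split_ifs <;> omega

theorem pvMeas_lt {v : Int} (hg : pvGood v) (hne : pvStep v ≠ v) :
    pvMeas (pvStep v) < pvMeas v := by
  unfold pvGood at hg
  have hm : ∀ w : Int, PySem.Int.mod w 2 = w % 2 :=
    fun w => PySem.Int.mod_eq_emod_of_pos (by norm_num)
  have hd : PySem.Int.floordiv v 2 = v / 2 := PySem.Int.floordiv_eq_ediv_of_pos (by norm_num)
  unfold pvStep at hne
  unfold pvStep pvMeas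
  simp only [hm, hd] at hne ⊢
  split_ifs at hne ⊢ <;> omega

theorem pvElemSteps_app {v : Int} (hg : pvGood v) (hne : pvStep v ≠ v) :
    pvElemSteps v = 1 + pvElemSteps (pvStep v) := by
  rw [pvElemSteps, if_neg hne, dif_pos (pvMeas_lt hg hne)]

theorem pvElemSteps_fix {v : Int} (hfix : pvStep v = v) : pvElemSteps v = 0 := by
  rw [pvElemSteps, if_pos hfix]

theorem pvElemSteps_nonneg (v : Int) : 0 ≤ pvElemSteps v := by
  induction v using pvElemSteps.induct with
  | case1 v hfix => rw [pvElemSteps, if_pos hfix]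
  | case2 v hfix hlt ih => rw [pvElemSteps, if_neg hfix, dif_pos hlt]; omega
  | case3 v hfix hlt => rw [pvElemSteps, if_neg hfix, dif_neg hlt]

-- the fold function of solution_alt, rewritten with max
theorem pvFoldB_eq (xs : List Int) : ∀ a : Int,
    xs.foldl (fun best v =>
      let steps := pvElemSteps v
      if best < steps then steps else best) a
      = xs.foldl (fun b v => max b (pvElemSteps v)) a := by
  induction xs with
  | nil => intro a; rfl
  | cons x t ih =>
    intro a
    simp only [List.foldl_cons]
    have : (let steps := pvElemSteps x; if a < steps then steps else a) = max a (pvElemSteps x) := by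
      simp only []
      split_ifs <;> omega
    rw [this, ih]

theorem pvFold_fix {xs : List Int} (h : ∀ v ∈ xs, pvStep v = v) :
    ∀ a : Int, 0 ≤ a → xs.foldl (fun b v => max b (pvElemSteps v)) a = a := by
  induction xs with
  | nil => intro a _; rfl
  | cons x t ih =>
    intro a ha
    simp only [List.foldl_cons]
    rw [pvElemSteps_fix (h x (by simp)), max_eq_left ha]
    exact ih (fun v hv => h v (by simp [hv])) a ha

theorem pvFold_shift {xs : List Int} (hg : ∀ v ∈ xs, pvGood v) :
    ∀ a b : Int, a = 1 + b → 0 ≤ b →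
      xs.foldl (fun c v => max c (pvElemSteps v)) a
        = 1 + (xs.map pvStep).foldl (fun c v => max c (pvElemSteps v)) b := by
  induction xs with
  | nil => intro a b hab _; simpa using hab
  | cons x t ih =>
    intro a b hab hb
    simp only [List.map_cons, List.foldl_cons]
    by_cases hx : pvStep x = x
    · rw [hx, pvElemSteps_fix hx]
      have h2 : max a (0 : Int) = 1 + max b 0 := by rw [hab]; omega
      exact ih (fun v hv => hg v (by simp [hv])) _ _ h2 (le_trans hb (le_max_left _ _))
    · have h1 : pvElemSteps x = 1 + pvElemSteps (pvStep x) := pvElemSteps_app (hg x (by simp)) hx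
      have h2 : max a (pvElemSteps x) = 1 + max b (pvElemSteps (pvStep x)) := by
        rw [h1, hab]; omega
      exact ih (fun v hv => hg v (by simp [hv])) _ _ h2 (le_trans hb (le_max_left _ _))

theorem pvFold_max_acc (xs : List Int) : ∀ a b : Int,
    xs.foldl (fun c v => max c (pvElemSteps v)) (max a b)
      = max a (xs.foldl (fun c v => max c (pvElemSteps v)) b) := by
  induction xs with
  | nil => intro a b; rfl
  | cons x t ih =>
    intro a b
    simp only [List.foldl_cons]
    rw [max_assoc, ih]

theorem pvFold_le_acc (xs : List Int) : ∀ a : Int,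
    a ≤ xs.foldl (fun c v => max c (pvElemSteps v)) a := by
  induction xs with
  | nil => intro a; exact le_refl a
  | cons x t ih =>
    intro a
    simp only [List.foldl_cons]
    exact le_trans (le_max_left _ _) (ih _)

theorem pvFold_mem_le {xs : List Int} {x : Int} (hx : x ∈ xs) : ∀ a : Int,
    pvElemSteps x ≤ xs.foldl (fun c v => max c (pvElemSteps v)) a := by
  induction xs with
  | nil => cases hx
  | cons y t ih =>
    intro a
    simp only [List.foldl_cons]
    rcases List.mem_cons.mp hx with h | h
    · subst h; exact le_trans (le_max_right _ _) (pvFold_le_acc t _)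
    · exact ih h _

theorem pvMeasL_le {arr : List Int} (hg : ∀ v ∈ arr, pvGood v) :
    pvMeasL (arr.map pvStep) ≤ pvMeasL arr := by
  induction arr with
  | nil => exact le_refl _
  | cons x t ih =>
    unfold pvMeasL at *
    simp only [List.map_cons, List.sum_cons]
    have ht : ((t.map pvStep).map pvMeas).sum ≤ (t.map pvMeas).sum :=
      ih (fun v hv => hg v (by simp [hv]))
    by_cases hx : pvStep x = x
    · rw [hx]; omega
    · have := pvMeas_lt (hg x (by simp)) hx
      omega

theorem pvMeasL_lt {arr : List Int} (hg : ∀ v ∈ arr, pvGood v)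
    (hne : arr.map pvStep ≠ arr) : pvMeasL (arr.map pvStep) < pvMeasL arr := by
  induction arr with
  | nil => exact absurd rfl hne
  | cons x t ih =>
    unfold pvMeasL at *
    simp only [List.map_cons, List.sum_cons]
    by_cases hx : pvStep x = x
    · have htne : t.map pvStep ≠ t := by
        intro h; exact hne (by simp [hx, h])
      have := ih (fun v hv => hg v (by simp [hv])) htne
      rw [hx]
      omega
    · have h1 := pvMeas_lt (hg x (by simp)) hx
      have h2 : pvMeasL (t.map pvStep) ≤ pvMeasL t := pvMeasL_le (fun v hv => hg v (by simp [hv]))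
      unfold pvMeasL at h2
      omega

theorem pvMap_eq_self {arr : List Int} (h : arr.map pvStep = arr) : ∀ v ∈ arr, pvStep v = v := by
  induction arr with
  | nil => intro v hv; cases hv
  | cons x t ih =>
    simp only [List.map_cons, List.cons.injEq] at h
    intro v hv
    rcases List.mem_cons.mp hv with hveq | hvt
    · subst hveq; exact h.1
    · exact ih h.2 v hvt

theorem pvShift_case {arr : List Int} (hg : ∀ v ∈ arr, pvGood v)
    (hne : arr.map pvStep ≠ arr) :
    arr.foldl (fun c v => max c (pvElemSteps v)) 0
      = 1 + (arr.map pvStep).foldl (fun c v => max c (pvElemSteps v)) 0 := by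
  obtain ⟨x, hx, hxne⟩ : ∃ x ∈ arr, pvStep x ≠ x := by
    by_contra hno
    push Not at hno
    refine hne ?_
    calc arr.map pvStep = arr.map id := List.map_congr_left (fun x hx => hno x hx)
      _ = arr := List.map_id arr
  have hx1 : (1 : Int) ≤ pvElemSteps x := by
    rw [pvElemSteps_app (hg x hx) hxne]
    have := pvElemSteps_nonneg (pvStep x)
    omega
  have h01 : arr.foldl (fun c v => max c (pvElemSteps v)) 0
      = arr.foldl (fun c v => max c (pvElemSteps v)) 1 := by
    rw [show (1 : Int) = max 1 0 from by omega, pvFold_max_acc]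
    have hle := le_trans hx1 (pvFold_mem_le hx 0)
    omega
  rw [h01, pvFold_shift hg 1 0 (by omega) (le_refl 0)]

theorem pvGood_map {arr : List Int} (hg : ∀ v ∈ arr, pvGood v) :
    ∀ v ∈ arr.map pvStep, pvGood v := by
  intro v hv
  obtain ⟨u, hu, rfl⟩ := List.mem_map.mp hv
  exact pvGood_step (hg u hu)

theorem pvLoop_eq : ∀ (n : Nat) (arr : List Int) (idx : Int), pvMeasL arr ≤ n →
    (∀ v ∈ arr, pvGood v) →
    pvLoopA arr idx = idx + arr.foldl (fun c v => max c (pvElemSteps v)) 0 := by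
  intro n
  induction n with
  | zero =>
    intro arr idx hle hg
    by_cases h : arr.map pvStep = arr
    · rw [pvLoopA, if_pos h, pvFold_fix (pvMap_eq_self h) 0 (le_refl 0)]; omega
    · have := pvMeasL_lt hg h
      omega
  | succ n ih =>
    intro arr idx hle hg
    by_cases h : arr.map pvStep = arr
    · rw [pvLoopA, if_pos h, pvFold_fix (pvMap_eq_self h) 0 (le_refl 0)]; omega
    · have hlt := pvMeasL_lt hg h
      rw [pvLoopA, if_neg h, dif_pos hlt,
        ih (arr.map pvStep) (idx + 1) (by omega) (pvGood_map hg), pvShift_case hg h]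
      omega

-- ===== VERDICT (by name: the statement is the Claim_ definition above) =====
theorem solution_spec : Claim_equal_solution := by
  unfold Claim_equal_solution
  intro arr _ hpre
  unfold Spec_solution solution solution_alt
  have hg : ∀ v ∈ arr, pvGood v := fun v hv => hpre v hv
  rw [pvLoop_eq (pvMeasL arr) arr 0 (le_refl _) hg, pvFoldB_eq]
  omega
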